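-- pv_equiv track=rewrite | github.com/hieunguy02/Lexical-Analyzer | lexical.py | dsfm_id
-- ===== SOURCE A (Python) =====
-- def char_to_col(char):
--   if (char.isdigit()):
--     return 1
--   elif (char == '.'):
--     return 2
--   elif (char.isalpha()):
--     return 3
--   elif (char == '_'):
--     return 4
--   else:
--     return 5
--
-- def dsfm_id(str):
--   '''
--   DFSM to recognize identifiers
--
--   0  1(d) 2(.)  3(l)  4(_)  5(invalid)
--
--   1   0    0      2     0      0
--
--   2   3    0      3     3      0
--
--   3   4    0      4     4      0
--
--   4   4    0      4     4      0
--
--   '''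
--   state = 1
--   accepting_state = [2, 3, 4]
--   table = [[0, 1, 2, 3, 4, 5], [1, 0, 0, 2, 0, 0], [2, 3, 0, 3, 3, 0],
--            [3, 4, 0, 4, 4, 0], [4, 4, 0, 4, 4, 0]]
--
--   for i in range(len(str)):
--     col = char_to_col(str[i])
--     state = table[state][col]
--     if state == 0:
--       break
--
--   if state == accepting_state[0] or state == accepting_state[1] or state == accepting_state[2]:
--     return 1
--   else:
--     return 0
-- ===== SOURCE B (Python) =====
-- def dsfm_id(str):
--     if not str or not str[0].isalpha():
--         return 0
--     for c in str[1:]: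
--         if not (c.isdigit() or c.isalpha() or c == '_'):
--             return 0
--     return 1
-- ===== Notes on version B (the rewrite author's own statement) =====
-- stated objective: simpler
-- what changed: Replaced the table-driven DFA (explicit transition matrix, state variable, column classifier) with direct character-class validation: first char must be a letter, the rest must be letter/digit/underscore.
import Mathlib
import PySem

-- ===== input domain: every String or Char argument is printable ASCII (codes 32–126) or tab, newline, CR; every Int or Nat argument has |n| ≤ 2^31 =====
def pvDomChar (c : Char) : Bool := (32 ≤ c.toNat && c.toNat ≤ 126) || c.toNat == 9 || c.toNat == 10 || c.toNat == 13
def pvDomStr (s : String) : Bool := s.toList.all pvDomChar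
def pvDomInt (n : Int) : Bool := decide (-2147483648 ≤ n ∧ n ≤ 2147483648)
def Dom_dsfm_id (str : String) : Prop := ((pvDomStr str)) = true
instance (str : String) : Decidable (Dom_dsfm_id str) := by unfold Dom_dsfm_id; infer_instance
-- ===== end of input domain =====

-- ===== PORT A =====
-- B replaces the table-driven DFA with direct character-class checks (objective: simpler).
-- char_to_col: the column classifier of A
def char_to_col (c : Char) : Int :=
  if PySem.Chars.isdigit c then 1
  else if c = '.' then 2
  else if PySem.Chars.isalpha c then 3
  else if c = '_' then 4
  else 5

-- the transition table of A
def dsfmTable : List (List Int) :=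
  [[0, 1, 2, 3, 4, 5], [1, 0, 0, 2, 0, 0], [2, 3, 0, 3, 3, 0],
   [3, 4, 0, 4, 4, 0], [4, 4, 0, 4, 4, 0]]

-- one transition: table[state][col] for col = char_to_col(str[i])
def dsfmStep (state : Int) (c : Char) : Int :=
  PySem.List.pyGetD (PySem.List.pyGetD dsfmTable state []) (char_to_col c) 0

-- the 'for i in range(len(str))' loop with its early 'break' on state == 0
def dsfmLoop : List Char → Int → Int
  | [], state => state
  | c :: cs, state =>
      let state' := dsfmStep state c
      if state' = 0 then state' else dsfmLoop cs state'

def dsfm_id (str : String) : Int :=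
  let state := dsfmLoop str.toList 1
  if state = 2 ∨ state = 3 ∨ state = 4 then 1 else 0

-- ===== PORT B =====
-- c.isdigit() or c.isalpha() or c == '_'
def dsfmTailOk (c : Char) : Bool :=
  PySem.Chars.isdigit c || PySem.Chars.isalpha c || c == '_'

def dsfm_id_alt (str : String) : Int :=
  match str.toList with
  | [] => 0
  | c :: rest =>
      if !(PySem.Chars.isalpha c) then 0
      else if rest.all dsfmTailOk then 1 else 0

-- ===== PRECONDITION & SPEC =====
def Spec_dsfm_id (str : String) (out : Int) : Prop := out = dsfm_id_alt str
instance (str : String) (out : Int) : Decidable (Spec_dsfm_id str out) := by unfold Spec_dsfm_id; infer_instance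

-- ===== CLAIM (what is proved, stated in full; the proofs are below) =====
def Claim_equal_dsfm_id : Prop := ∀ (str : String), Dom_dsfm_id str → Spec_dsfm_id str (dsfm_id str)

-- ===== LEMMAS AND PROOFS =====

-- a character with isdigit cannot have isalpha
theorem isalpha_of_isdigit (c : Char) :
    PySem.Chars.isdigit c = true → PySem.Chars.isalpha c = false := by
  simp [PySem.Chars.isdigit, PySem.Chars.isalpha, PySem.Chars.isupper, PySem.Chars.islower,
    Char.le_def, UInt32.le_iff_toNat_le]
  omega

-- one transition out of a state in {2,3,4}: to 3/4 on a valid tail character, else to 0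
theorem dsfmStep_tail (s : Int) (c : Char) (hs : s = 2 ∨ s = 3 ∨ s = 4) :
    dsfmStep s c = if dsfmTailOk c then (if s = 2 then 3 else 4) else 0 := by
  unfold dsfmStep char_to_col dsfmTailOk
  rcases hs with h | h | h <;> subst h <;>
    split_ifs with h1 h2 h3 h4 <;>
    simp_all [dsfmTable, PySem.List.pyGetD, isalpha_of_isdigit,
      show PySem.Chars.isalpha '.' = false from by decide,
      show PySem.Chars.isdigit '.' = false from by decide]

-- the first transition: state 1 goes to 2 exactly on a letter, else to 0
theorem dsfmStep_one (c : Char) :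
    dsfmStep 1 c = if PySem.Chars.isalpha c then 2 else 0 := by
  unfold dsfmStep char_to_col
  split_ifs with h1 h2 h3 h4 <;>
    simp_all [dsfmTable, PySem.List.pyGetD, isalpha_of_isdigit,
      show PySem.Chars.isalpha '.' = false from by decide,
      show PySem.Chars.isdigit '.' = false from by decide]

-- from an accepting state, the loop ends in an accepting state iff every character is a valid tail char
theorem dsfmLoop_tail (cs : List Char) :
    ∀ (s : Int), (s = 2 ∨ s = 3 ∨ s = 4) →
      ((dsfmLoop cs s = 2 ∨ dsfmLoop cs s = 3 ∨ dsfmLoop cs s = 4) ↔ cs.all dsfmTailOk = true) := by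
  induction cs with
  | nil => intro s hs; simpa [dsfmLoop] using hs
  | cons c cs ih =>
      intro s hs
      by_cases hc : dsfmTailOk c = true
      · by_cases h2 : s = 2
        · subst h2
          simp [dsfmLoop, dsfmStep_tail 2 c (by simp), hc, ih 3 (by simp)]
        · have hstep : dsfmStep s c = 4 := by rw [dsfmStep_tail s c hs]; simp [hc, h2]
          simp [dsfmLoop, hstep, hc, ih 4 (by simp)]
      · simp [dsfmLoop, dsfmStep_tail s c hs, hc]

-- ===== VERDICT (by name: the statement is the Claim_ definition above) =====
theorem dsfm_id_spec : Claim_equal_dsfm_id := by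
  intro str _
  unfold Spec_dsfm_id dsfm_id dsfm_id_alt
  cases h : str.toList with
  | nil => simp [dsfmLoop]
  | cons c rest =>
      by_cases ha : PySem.Chars.isalpha c = true
      · have := dsfmLoop_tail rest 2 (by simp)
        simp only [dsfmLoop, dsfmStep_one, ha, if_true]
        simp only [show (2:Int) ≠ 0 by decide, if_false]
        by_cases ht : rest.all dsfmTailOk = true
        · simp [this, ht]
        · have : ¬(dsfmLoop rest 2 = 2 ∨ dsfmLoop rest 2 = 3 ∨ dsfmLoop rest 2 = 4) := by
            rw [this]; exact ht
          simp [this, ht]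
      · simp [dsfmLoop, dsfmStep_one, ha]
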